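-- pv_equiv track=rewrite | github.com/DunstanBecht/diwii-data | analyze/tools/export.py | homogenize
-- ===== SOURCE A (Python) =====
-- def homogenize(answers, default=0, name=None,):
--     if name==None:
--         name = []
--         for a in answers:
--             for t in a:
--                 if t[0] not in name:
--                     name.append(t[0])
--         name.sort()
--     data = []
--     for a in answers:
--         d = [None for i in range(len(name))]
--         for i in range(len(a)):
--             if a[i][0] in name:
--                 d[name.index(a[i][0])] = a[i][1]
--         for i in range(len(d)):
--             if d[i]==None:
--                 d[i]=default
--         data.append(d)
--     name = [str(n) for n in name]
--     return name, data
-- ===== SOURCE B (Python) =====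
-- def homogenize(answers, default=0, name=None,):
--     if name == None:
--         name = []
--         for a in answers:
--             for t in a:
--                 if t[0] not in name:
--                     name.append(t[0])
--         name.sort()
--     data = []
--     for a in answers:
--         vals = {t[0]: t[1] for t in a}
--         data.append([vals.get(n, default) for n in name])
--     return [str(n) for n in name], data
-- ===== Notes on version B (the rewrite author's own statement) =====
-- stated objective: simpler
-- what changed: The row construction replaces A's two-pass scheme (fill a row of None sentinels by name.index positions, then a second pass replacing None by default) with one dict built per answer and a single comprehension projecting it onto the name list, eliminating the sentinel pass and the repeated name.index scans.
-- outside the precondition, e.g. on homogenize([[('x', 1)]], 0, ['x', 'x']): A returns (['x', 'x'], [[1, 0]]), B returns (['x', 'x'], [[1, 1]])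
import Mathlib
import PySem

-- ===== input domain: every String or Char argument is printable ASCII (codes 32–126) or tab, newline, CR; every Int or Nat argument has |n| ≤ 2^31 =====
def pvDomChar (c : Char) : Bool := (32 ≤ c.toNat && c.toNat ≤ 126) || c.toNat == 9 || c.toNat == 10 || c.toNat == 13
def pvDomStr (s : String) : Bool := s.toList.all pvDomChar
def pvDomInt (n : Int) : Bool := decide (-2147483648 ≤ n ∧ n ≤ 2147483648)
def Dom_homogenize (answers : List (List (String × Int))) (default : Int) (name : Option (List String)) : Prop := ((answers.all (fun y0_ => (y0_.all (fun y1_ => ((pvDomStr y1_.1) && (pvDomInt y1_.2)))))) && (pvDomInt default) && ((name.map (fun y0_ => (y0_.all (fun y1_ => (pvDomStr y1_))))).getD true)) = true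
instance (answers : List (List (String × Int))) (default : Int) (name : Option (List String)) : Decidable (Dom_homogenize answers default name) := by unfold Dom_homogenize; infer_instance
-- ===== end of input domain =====

-- B replaces A's two-pass row construction (None-sentinel fill via name.index, then a
-- None→default replacement pass) with one per-answer dict projected onto name in a single pass.

-- ===== PORT A =====
-- name-collection phase (textually identical in A and B): first occurrences, in order
def collectNames (answers : List (List (String × Int))) : List String :=
  answers.foldl (fun nm a => a.foldl (fun nm t => PySem.Set.add nm t.1) nm) []

def homogenize (answers : List (List (String × Int))) (default : Int) (name : Option (List String)) : List String × List (List Int) :=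
  let nm : List String :=
    match name with
    | none => PySem.List.sorted (collectNames answers) (fun x => x) false
    | some l => l
  let data : List (List Int) := answers.foldl (fun data a =>
    -- d = [None for i in range(len(name))]  (None modelled by Option)
    let d0 : List (Option Int) := (List.range nm.length).map (fun _ => (none : Option Int))
    -- for i in range(len(a)): if a[i][0] in name: d[name.index(a[i][0])] = a[i][1]
    let d1 : List (Option Int) := (PySem.List.pyRange 0 (PySem.List.len a) 1).foldl
      (fun d i =>
        let t := PySem.List.pyGetD a i ("", 0)
        if t.1 ∈ nm then d.set ((PySem.List.index? nm t.1).getD 0) (some t.2) else d) d0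
    -- for i in range(len(d)): if d[i]==None: d[i]=default   (positional None→default replacement)
    let d2 : List Int := d1.map (fun x => match x with | none => default | some v => v)
    data ++ [d2]) []
  -- str(n) on a str is the identity
  (nm.map (fun n => n), data)

-- ===== PORT B =====
def homogenize_alt (answers : List (List (String × Int))) (default : Int) (name : Option (List String)) : List String × List (List Int) :=
  let nm : List String :=
    match name with
    | none => PySem.List.sorted (collectNames answers) (fun x => x) false
    | some l => l
  -- vals = {t[0]: t[1] for t in a};  row = [vals.get(n, default) for n in name]
  let data : List (List Int) := answers.map (fun a =>
    let vals : PySem.Dict String Int := a.foldl (fun d t => d.insert t.1 t.2) PySem.Dict.empty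
    nm.map (fun n => vals.getD n default))
  (nm.map (fun n => n), data)

-- ===== PRECONDITION & SPEC =====
-- Pre_ excludes only an explicitly passed name list with duplicate entries: there A's
-- name.index writes every value into the FIRST copy of a duplicated column while B fills all
-- copies — a defensible-corner artefact of duplicate keys that no caller would specify.
def Pre_homogenize (answers : List (List (String × Int))) (default : Int) (name : Option (List String)) : Prop :=
  (name.getD []).Nodup
instance (answers : List (List (String × Int))) (default : Int) (name : Option (List String)) : Decidable (Pre_homogenize answers default name) := by unfold Pre_homogenize; infer_instance
def pvWitness_homogenize : (List (List (String × Int))) × Int × Option (List String) :=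
  ([[("b", 1), ("a", 2), ("b", 5)], [("c", 3)]], 0, none)
def Spec_homogenize (answers : List (List (String × Int))) (default : Int) (name : Option (List String)) (out : List String × List (List Int)) : Prop := out = homogenize_alt answers default name
instance (answers : List (List (String × Int))) (default : Int) (name : Option (List String)) (out : List String × List (List Int)) : Decidable (Spec_homogenize answers default name out) := by unfold Spec_homogenize; infer_instance

-- ===== CLAIM (what is proved, stated in full; the proofs are below) =====
def Claim_equal_homogenize : Prop := ∀ (answers : List (List (String × Int))) (default : Int) (name : Option (List String)), Dom_homogenize answers default name → Pre_homogenize answers default name → Spec_homogenize answers default name (homogenize answers default name)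

-- ===== LEMMAS AND PROOFS =====

-- the names collected by the shared phase are distinct
lemma nodup_foldl_add (a : List (String × Int)) (s : PySem.Set String) (h : s.Nodup) :
    (a.foldl (fun nm t => PySem.Set.add nm t.1) s).Nodup := by
  induction a generalizing s with
  | nil => exact h
  | cons t a ih => exact ih _ (PySem.Set.nodup_add s t.1 h)

lemma nodup_collectNames (answers : List (List (String × Int))) : (collectNames answers).Nodup := by
  unfold collectNames
  generalize hs : ([] : PySem.Set String) = s
  have hnd : s.Nodup := by rw [← hs]; exact List.nodup_nil
  clear hs
  induction answers generalizing s with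
  | nil => exact hnd
  | cons a answers ih => exact ih _ (nodup_foldl_add a s hnd)

-- the inner index loop, as a fold over the answer list, computes name.map of the dict lookup
lemma fold_set_eq_map (nm : List String) (hnd : nm.Nodup) (a : List (String × Int)) :
    a.foldl (fun d t => if t.1 ∈ nm then d.set ((PySem.List.index? nm t.1).getD 0) (some t.2) else d)
      (nm.map (fun _ => (none : Option Int)))
    = nm.map (fun n => (a.foldl (fun d t => d.insert t.1 t.2) (PySem.Dict.empty : PySem.Dict String Int)).get? n) := by
  induction a using List.reverseRecOn with
  | nil => simp
  | append_singleton a t ih =>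
    rw [List.foldl_append, List.foldl_append, ih]
    simp only [List.foldl_cons, List.foldl_nil]
    by_cases hm : t.1 ∈ nm
    · simp only [if_pos hm]
      obtain ⟨k, hk⟩ := Option.isSome_iff_exists.mp ((PySem.List.index?_isSome_iff nm t.1).mpr hm)
      obtain ⟨hklt, hkeq, hmin⟩ := PySem.List.getElem_of_index?_eq_some hk
      rw [hk]
      apply List.ext_getElem
      · simp
      · intro j h1 h2
        simp only [List.getElem_set, List.getElem_map, Option.getD_some]
        have hj : j < nm.length := by simpa using h2
        rw [PySem.Dict.get?_insert]
        have hiff : nm[j] = t.1 ↔ j = k := by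
          constructor
          · intro hje
            exact (List.Nodup.getElem_inj_iff hnd).mp (hje.trans hkeq.symm)
          · intro hje; subst hje; exact hkeq
        by_cases hjk : j = k
        · subst hjk
          simp [hkeq]
        · have hne : nm[j] ≠ t.1 := fun h => hjk (hiff.mp h)
          have hkj : ¬ k = j := fun h => hjk h.symm
          simp [hkj, hne]
    · simp only [if_neg hm]
      apply List.map_congr_left
      intro n hn
      have hne : n ≠ t.1 := fun h => hm (h ▸ hn)
      exact (PySem.Dict.get?_insert_of_ne _ _ hne).symm

-- one row of A equals one row of B, for a duplicate-free name list
lemma row_eq (nm : List String) (hnd : nm.Nodup) (default : Int) (a : List (String × Int)) :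
    (((PySem.List.pyRange 0 (PySem.List.len a) 1).foldl
        (fun d i =>
          let t := PySem.List.pyGetD a i ("", 0)
          if t.1 ∈ nm then d.set ((PySem.List.index? nm t.1).getD 0) (some t.2) else d)
        ((List.range nm.length).map (fun _ => (none : Option Int)))).map
      (fun x => match x with | none => default | some v => v))
    = nm.map (fun n => (a.foldl (fun d t => d.insert t.1 t.2) (PySem.Dict.empty : PySem.Dict String Int)).getD n default) := by
  have h0 : (List.range nm.length).map (fun _ => (none : Option Int)) = nm.map (fun _ => none) := by
    simp [List.map_const']
  rw [h0]
  have hfold := PySem.List.foldl_pyRange_zero_pyGetD a ("", 0)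
    (fun (d : List (Option Int)) (t : String × Int) =>
      if t.1 ∈ nm then d.set ((PySem.List.index? nm t.1).getD 0) (some t.2) else d)
    (nm.map (fun _ => (none : Option Int)))
  rw [show (fun (d : List (Option Int)) (i : Int) =>
        let t := PySem.List.pyGetD a i ("", 0)
        if t.1 ∈ nm then d.set ((PySem.List.index? nm t.1).getD 0) (some t.2) else d)
      = (fun (d : List (Option Int)) (i : Int) =>
        if (PySem.List.pyGetD a i ("", 0)).1 ∈ nm then
          d.set ((PySem.List.index? nm (PySem.List.pyGetD a i ("", 0)).1).getD 0) (some (PySem.List.pyGetD a i ("", 0)).2) else d) from rfl,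
      hfold, fold_set_eq_map nm hnd a, List.map_map]
  apply List.map_congr_left
  intro n _
  simp only [Function.comp]
  rw [PySem.Dict.getD_eq_get?_getD]
  cases (a.foldl (fun d t => d.insert t.1 t.2) (PySem.Dict.empty : PySem.Dict String Int)).get? n <;> rfl

lemma nm_nodup (answers : List (List (String × Int))) (name : Option (List String))
    (hpre : (name.getD []).Nodup) :
    (match name with
     | none => PySem.List.sorted (collectNames answers) (fun x => x) false
     | some l => l).Nodup := by
  cases name with
  | none =>
    exact ((PySem.List.sorted_perm (collectNames answers) (fun x => x) false).nodup_iff).mpr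
      (nodup_collectNames answers)
  | some l => simpa using hpre

-- ===== VERDICT (by name: the statement is the Claim_ definition above) =====
theorem homogenize_spec : Claim_equal_homogenize := by
  intro answers default name _ hpre
  unfold Spec_homogenize homogenize homogenize_alt
  have hnd := nm_nodup answers name hpre
  simp only
  rw [PySem.List.foldl_append_singleton_eq_map]
  simp only [List.nil_append, Prod.mk.injEq, true_and]
  apply List.map_congr_left
  intro a _
  exact row_eq _ hnd default a
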